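-- pv_equiv track=rewrite | github.com/pejinovics/SIIT-zadaci | OP/Vezbe/Domaci zadatak/slagalica.py | konacno
-- ===== SOURCE A (Python) =====
-- def konacno(niz):
--
--     konacno_resenje = 0
--     for i in niz:
--         if i <= 0:
--             i += 6
--             konacno_resenje += i
--         else:
--             konacno_resenje += i
--     return konacno_resenje
-- ===== SOURCE B (Python) =====
-- def konacno(niz):
--     return sum(niz) + 6 * sum(1 for i in niz if i <= 0)
-- ===== Notes on version B (the rewrite author's own statement) =====
-- stated objective: simpler
-- what changed: Replaces the single branching accumulator loop by two independent aggregations (total sum plus a count of non-positive elements) combined algebraically as total + 6*count.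
import Mathlib
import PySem

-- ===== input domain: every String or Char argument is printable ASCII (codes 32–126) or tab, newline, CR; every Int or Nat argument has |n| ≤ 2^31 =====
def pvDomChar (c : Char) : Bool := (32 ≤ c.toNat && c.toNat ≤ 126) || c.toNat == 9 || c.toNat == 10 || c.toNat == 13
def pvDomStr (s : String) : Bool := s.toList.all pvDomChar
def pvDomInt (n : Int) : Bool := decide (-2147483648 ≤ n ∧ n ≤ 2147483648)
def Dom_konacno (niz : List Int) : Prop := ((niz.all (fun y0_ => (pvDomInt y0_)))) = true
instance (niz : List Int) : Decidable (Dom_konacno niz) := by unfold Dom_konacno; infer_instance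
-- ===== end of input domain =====

-- B replaces A's branching accumulator loop by sum(niz) + 6 * count of non-positive elements (objective: simpler).
-- ===== PORT A =====
def konacno (niz : List Int) : Int :=
  niz.foldl (fun konacno_resenje i =>
    if i ≤ 0 then konacno_resenje + (i + 6) else konacno_resenje + i) 0

-- ===== PORT B =====
def konacno_alt (niz : List Int) : Int :=
  niz.sum + 6 * ((niz.filter (fun i => i ≤ 0)).map (fun _ => (1 : Int))).sum

-- ===== PRECONDITION & SPEC =====
def Spec_konacno (niz : List Int) (out : Int) : Prop := out = konacno_alt niz
instance (niz : List Int) (out : Int) : Decidable (Spec_konacno niz out) := by unfold Spec_konacno; infer_instance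

-- ===== CLAIM (what is proved, stated in full; the proofs are below) =====
def Claim_equal_konacno : Prop := ∀ (niz : List Int), Dom_konacno niz → Spec_konacno niz (konacno niz)

-- ===== LEMMAS AND PROOFS =====

-- ===== VERDICT (by name: the statement is the Claim_ definition above) =====
theorem konacno_foldl (niz : List Int) (acc : Int) :
    niz.foldl (fun konacno_resenje i =>
      if i ≤ 0 then konacno_resenje + (i + 6) else konacno_resenje + i) acc
      = acc + konacno_alt niz := by
  induction niz generalizing acc with
  | nil => simp [konacno_alt]
  | cons x xs ih =>
    simp only [List.foldl_cons, ih, konacno_alt, List.sum_cons, List.filter_cons]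
    by_cases h : x ≤ 0 <;> simp [h] <;> ring

theorem konacno_spec : Claim_equal_konacno := by
  intro niz _
  unfold Spec_konacno konacno
  rw [konacno_foldl]
  ring
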